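-- pv_equiv track=rewrite | github.com/BotfatherDev/ChatModerator | tgbot/handlers/essential/fun.py | select_emoji
-- ===== SOURCE A (Python) =====
-- def select_emoji(length, is_biba):
--     # Emojis for bibas, from smallest to largest
--     biba_emojis = ["🥒", "🍌", "🌽", "🥖", "🌵", "🌴"]
--
--     # Emojis for breasts, from smallest to largest
--     breast_emojis = ["🍓", "🍊", "🍎", "🥭", "🍉", "🎃"]
--
--     # Select the appropriate list of emojis
--     emojis = biba_emojis if is_biba else breast_emojis
--
--     # Select an emoji based on length
--     for size, emoji in zip((1, 5, 10, 15, 20, 25), emojis):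
--         if length <= size:
--             return emoji
--
--     # If none of the sizes matched, return the largest emoji
--     return emojis[-1]
-- ===== SOURCE B (Python) =====
-- def select_emoji(length, is_biba):
--     # Simpler: compute the bucket index with closed-form arithmetic instead of scanning thresholds.
--     biba_emojis = ["🥒", "🍌", "🌽", "🥖", "🌵", "🌴"]
--     breast_emojis = ["🍓", "🍊", "🍎", "🥭", "🍉", "🎃"]
--     emojis = biba_emojis if is_biba else breast_emojis
--     idx = 0 if length <= 1 else min((length - 1) // 5 + 1, 5)
--     return emojis[idx]
-- ===== Notes on version B (the rewrite author's own statement) =====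
-- stated objective: simpler
-- what changed: Replaced the threshold-scanning loop over zip((1,5,10,15,20,25), emojis) with a closed-form arithmetic bucket index min((length-1)//5+1, 5) (0 for length<=1), read directly from the list.
import Mathlib
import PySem

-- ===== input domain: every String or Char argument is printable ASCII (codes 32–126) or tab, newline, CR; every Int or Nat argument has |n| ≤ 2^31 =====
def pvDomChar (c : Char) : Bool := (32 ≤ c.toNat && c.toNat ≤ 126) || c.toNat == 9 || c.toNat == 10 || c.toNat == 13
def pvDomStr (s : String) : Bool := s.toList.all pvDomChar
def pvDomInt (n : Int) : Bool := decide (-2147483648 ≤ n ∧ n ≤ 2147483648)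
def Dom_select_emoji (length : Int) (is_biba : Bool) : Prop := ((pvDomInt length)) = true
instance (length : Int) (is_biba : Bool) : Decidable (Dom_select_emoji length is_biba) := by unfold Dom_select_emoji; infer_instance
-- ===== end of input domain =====

-- B replaces A's threshold-scanning loop with a closed-form arithmetic bucket index (objective: simpler).


-- ===== PORT A =====
-- the 'for size, emoji in zip(...): if length <= size: return emoji' loop
def pvSelectLoop (length : Int) : List (Int × String) → Option String
  | [] => none
  | (size, emoji) :: rest => if length ≤ size then some emoji else pvSelectLoop length rest

def select_emoji (length : Int) (is_biba : Bool) : String :=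
  let biba_emojis := ["🥒", "🍌", "🌽", "🥖", "🌵", "🌴"]
  let breast_emojis := ["🍓", "🍊", "🍎", "🥭", "🍉", "🎃"]
  let emojis := if is_biba then biba_emojis else breast_emojis
  match pvSelectLoop length (List.zip [1, 5, 10, 15, 20, 25] emojis) with
  | some e => e
  | none => (PySem.List.pyGet? emojis (-1)).getD ""   -- emojis[-1]; list is non-empty, getD never used

-- ===== PORT B =====
def select_emoji_alt (length : Int) (is_biba : Bool) : String :=
  let biba_emojis := ["🥒", "🍌", "🌽", "🥖", "🌵", "🌴"]
  let breast_emojis := ["🍓", "🍊", "🍎", "🥭", "🍉", "🎃"]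
  let emojis := if is_biba then biba_emojis else breast_emojis
  let idx : Int := if length ≤ 1 then 0 else min (PySem.Int.floordiv (length - 1) 5 + 1) 5
  (PySem.List.pyGet? emojis idx).getD ""   -- emojis[idx]; idx ∈ [0,5], getD never used

-- ===== PRECONDITION & SPEC =====
def Spec_select_emoji (length : Int) (is_biba : Bool) (out : String) : Prop := out = select_emoji_alt length is_biba
instance (length : Int) (is_biba : Bool) (out : String) : Decidable (Spec_select_emoji length is_biba out) := by unfold Spec_select_emoji; infer_instance

-- ===== CLAIM (what is proved, stated in full; the proofs are below) =====
def Claim_equal_select_emoji : Prop := ∀ (length : Int) (is_biba : Bool), Dom_select_emoji length is_biba → Spec_select_emoji length is_biba (select_emoji length is_biba)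

-- ===== LEMMAS AND PROOFS =====
theorem select_emoji_eq_alt (length : Int) (is_biba : Bool) :
    select_emoji length is_biba = select_emoji_alt length is_biba := by
  unfold select_emoji select_emoji_alt
  rw [PySem.Int.floordiv_eq_ediv_of_pos (by norm_num : (0:Int) < 5)]
  by_cases h1 : length ≤ 1
  · cases is_biba <;> simp [pvSelectLoop, h1, PySem.List.pyGet?, PySem.List.pyIdx?]
  · by_cases h2 : length ≤ 5
    · have : (length - 1) / 5 = 0 := by omega
      cases is_biba <;>
        simp [pvSelectLoop, h1, h2, this, PySem.List.pyGet?, PySem.List.pyIdx?]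
    · by_cases h3 : length ≤ 10
      · have : (length - 1) / 5 = 1 := by omega
        cases is_biba <;>
          simp [pvSelectLoop, h1, h2, h3, this, PySem.List.pyGet?, PySem.List.pyIdx?]
      · by_cases h4 : length ≤ 15
        · have : (length - 1) / 5 = 2 := by omega
          cases is_biba <;>
            simp [pvSelectLoop, h1, h2, h3, h4, this, PySem.List.pyGet?, PySem.List.pyIdx?]
        · by_cases h5 : length ≤ 20
          · have : (length - 1) / 5 = 3 := by omega
            cases is_biba <;>
              simp [pvSelectLoop, h1, h2, h3, h4, h5, this, PySem.List.pyGet?, PySem.List.pyIdx?]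
          · by_cases h6 : length ≤ 25
            · have : (length - 1) / 5 = 4 := by omega
              cases is_biba <;>
                simp [pvSelectLoop, h1, h2, h3, h4, h5, h6, this, PySem.List.pyGet?, PySem.List.pyIdx?]
            · have : min ((length - 1) / 5 + 1) 5 = 5 := by omega
              cases is_biba <;>
                simp [pvSelectLoop, h1, h2, h3, h4, h5, h6, this, PySem.List.pyGet?, PySem.List.pyIdx?]

-- ===== VERDICT (by name: the statement is the Claim_ definition above) =====
theorem select_emoji_spec : Claim_equal_select_emoji := by
  intro length is_biba _
  exact select_emoji_eq_alt length is_biba
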